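-- pv_equiv track=rewrite | github.com/nickmckay/LiPD-utilities | Python/lipd/pkg_resources/helpers/ts_lint.py | _iter_ts
-- ===== SOURCE A (Python) =====
-- def _iter_ts(full, category, invalid):
--     """
--     Match an invalid entry to one of the TSName synonyms.
--     :param str category: Name of category being searched
--     :param str invalid: Invalid tsname string
--     :return str: Valid tsname
--     """
--     valid = ''
--
--     # If a leading hyphen is in the string, get rid of it.
--     if '_' == invalid[0]:
--         invalid = invalid[1:]
--
--     # If one specific category is passed through
--     if category:
--         for line in full[category]:
--             for key in line:
--                 if invalid in key.lower():
--                     valid = line[0]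
--                     break
--     # If the entire TSNames dict is passed through (i.e. final effort, all categories have failed so far)
--     else:
--         for k, v in full.items():
--             for line in v:
--                 for key in line:
--                     if invalid in key.lower():
--                         valid = line[0]
--                         break
--
--     return valid
-- ===== SOURCE B (Python) =====
-- def _iter_ts(full, category, invalid):
--     """
--     Match an invalid entry to one of the TSName synonyms.
--     Reverse scan with early exit: the first matching line from the end
--     is exactly the line A's forward overwriting scan keeps.
--     """
--     if invalid[:1] == '_':
--         invalid = invalid[1:]
--
--     if category:
--         lines = full[category]
--     else:
--         lines = [line for v in full.values() for line in v]
--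
--     for line in reversed(lines):
--         if any(invalid in key.lower() for key in line):
--             return line[0]
--     return ''
-- ===== Notes on version B (the rewrite author's own statement) =====
-- stated objective: alternative
-- what changed: A scans every line forward and keeps overwriting `valid` with each later match; B flattens the candidate lines once and scans them in reverse, returning on the first match (the last matching line), so the scan stops early instead of always visiting everything.
import Mathlib
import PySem

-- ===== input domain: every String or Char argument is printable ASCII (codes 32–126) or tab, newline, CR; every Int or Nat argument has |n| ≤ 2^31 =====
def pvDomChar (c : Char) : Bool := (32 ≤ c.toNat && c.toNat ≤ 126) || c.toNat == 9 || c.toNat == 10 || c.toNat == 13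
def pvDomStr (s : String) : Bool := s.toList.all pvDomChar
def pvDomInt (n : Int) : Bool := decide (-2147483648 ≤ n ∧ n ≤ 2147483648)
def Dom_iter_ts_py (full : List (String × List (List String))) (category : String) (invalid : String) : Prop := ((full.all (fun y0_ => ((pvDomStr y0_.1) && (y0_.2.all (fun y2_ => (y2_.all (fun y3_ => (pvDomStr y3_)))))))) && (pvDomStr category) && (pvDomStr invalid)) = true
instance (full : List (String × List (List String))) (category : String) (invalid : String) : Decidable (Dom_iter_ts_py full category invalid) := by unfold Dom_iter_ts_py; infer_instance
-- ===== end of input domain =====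

-- B replaces A's forward overwriting scan by a reverse scan with early exit over the
-- flattened candidate lines (objective: alternative decomposition, same cost).
-- ===== PORT A =====
-- inner 'for key in line: if invalid in key.lower(): valid = line[0]; break'
-- (line[0] is taken via headD: at the point it is read, line contains key, so it is nonempty)
def pvKeysA (invalid : String) (line : List String) (valid : String) : List String → String
  | [] => valid
  | key :: rest =>
    if PySem.Str.isIn invalid (PySem.Str.lower key) then line.headD valid
    else pvKeysA invalid line valid rest

def iter_ts_py (full : List (String × List (List String))) (category : String) (invalid : String) : String :=
  let valid := ""
  let invalid := if PySem.Str.pyGet? invalid 0 = some '_' then PySem.Str.slice invalid (some 1) none else invalid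
  if category ≠ "" then
    match (PySem.Dict.mk full).get? category with
    | some lines => lines.foldl (fun valid line => pvKeysA invalid line valid line) valid
    | none => valid   -- KeyError in Python: excluded by Pre_
  else
    full.foldl (fun valid kv => kv.2.foldl (fun valid line => pvKeysA invalid line valid line) valid) valid

-- ===== PORT B =====
-- 'for line in reversed(lines): if any(...): return line[0]' / 'return ""'
def pvLastMatch (invalid : String) : List (List String) → String
  | [] => ""
  | line :: rest =>
    if line.any (fun key => PySem.Str.isIn invalid (PySem.Str.lower key)) then line.headD ""
    else pvLastMatch invalid rest

def iter_ts_py_alt (full : List (String × List (List String))) (category : String) (invalid : String) : String :=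
  let invalid := if PySem.Str.slice invalid none (some 1) = "_" then PySem.Str.slice invalid (some 1) none else invalid
  let lines := if category ≠ "" then ((PySem.Dict.mk full).get? category).getD []
               else full.flatMap (fun kv => kv.2)
  pvLastMatch invalid lines.reverse

-- ===== PRECONDITION & SPEC =====
-- Pre_ excludes: empty `invalid` (A raises IndexError on invalid[0]) and a nonempty
-- `category` absent from `full` (A raises KeyError); and association lists with duplicate
-- keys, a corner on which the Python-dict collapse of duplicates makes either behaviour accidental.
def Pre_iter_ts_py (full : List (String × List (List String))) (category : String) (invalid : String) : Prop :=
  invalid ≠ "" ∧ (category ≠ "" → category ∈ full.map (fun kv => kv.1)) ∧ (full.map (fun kv => kv.1)).Nodup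
instance (full : List (String × List (List String))) (category : String) (invalid : String) : Decidable (Pre_iter_ts_py full category invalid) := by unfold Pre_iter_ts_py; infer_instance

def pvWitness_iter_ts_py : (List (String × List (List String))) × String × String :=
  ([("a", [["Foo", "BAR"], ["Baz", "qux"]]), ("b", [["Zip", "zap"]])], "a", "ba")

def Spec_iter_ts_py (full : List (String × List (List String))) (category : String) (invalid : String) (out : String) : Prop := out = iter_ts_py_alt full category invalid
instance (full : List (String × List (List String))) (category : String) (invalid : String) (out : String) : Decidable (Spec_iter_ts_py full category invalid out) := by unfold Spec_iter_ts_py; infer_instance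

-- ===== CLAIM (what is proved, stated in full; the proofs are below) =====
def Claim_equal_iter_ts_py : Prop := ∀ (full : List (String × List (List String))) (category : String) (invalid : String), Dom_iter_ts_py full category invalid → Pre_iter_ts_py full category invalid → Spec_iter_ts_py full category invalid (iter_ts_py full category invalid)

-- ===== LEMMAS AND PROOFS =====

-- A's inner key loop is "last-write = any match picks the head".
theorem pvKeysA_eq (invalid : String) (line : List String) (valid : String) :
    ∀ keys, pvKeysA invalid line valid keys =
      if keys.any (fun key => PySem.Str.isIn invalid (PySem.Str.lower key)) then line.headD valid
      else valid := by
  intro keys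
  induction keys with
  | nil => simp [pvKeysA]
  | cons k rest ih =>
    rw [pvKeysA]
    by_cases h : PySem.Str.isIn invalid (PySem.Str.lower k) = true
    · rw [if_pos h, List.any_cons, h, Bool.true_or, if_pos rfl]
    · have hf : PySem.Str.isIn invalid (PySem.Str.lower k) = false := by simpa using h
      rw [if_neg h, ih, List.any_cons, hf, Bool.false_or]

-- A's forward overwriting fold equals B's reverse scan with early exit.
theorem foldl_eq_lastMatch (invalid : String) :
    ∀ (lines : List (List String)),
      lines.foldl (fun valid line => pvKeysA invalid line valid line) "" =
      pvLastMatch invalid lines.reverse := by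
  intro lines
  induction lines using List.reverseRecOn with
  | nil => simp [pvLastMatch]
  | append_singleton rest line ih =>
    rw [List.foldl_append, List.reverse_append, List.reverse_singleton, List.singleton_append,
      List.foldl_cons, List.foldl_nil, ih, pvLastMatch, pvKeysA_eq]
    by_cases h : line.any (fun key => PySem.Str.isIn invalid (PySem.Str.lower key)) = true
    · rw [h, if_pos rfl, if_pos rfl]
      cases line with
      | nil => simp at h
      | cons a t => rfl
    · have hf : line.any (fun key => PySem.Str.isIn invalid (PySem.Str.lower key)) = false := by
        simpa using h
      rw [hf, if_neg (by simp), if_neg (by simp)]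

-- the nested fold over the whole dict is the fold over the flattened lines
theorem nested_foldl_eq_flat (invalid : String) (full : List (String × List (List String))) :
    full.foldl (fun valid kv => kv.2.foldl (fun valid line => pvKeysA invalid line valid line) valid) "" =
    (full.flatMap (fun kv => kv.2)).foldl (fun valid line => pvKeysA invalid line valid line) "" := by
  suffices h : ∀ (l : List (String × List (List String))) (init : String),
      l.foldl (fun valid kv => kv.2.foldl (fun valid line => pvKeysA invalid line valid line) valid) init =
      (l.flatMap (fun kv => kv.2)).foldl (fun valid line => pvKeysA invalid line valid line) init from
    h full ""
  intro l
  induction l with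
  | nil => intro init; simp
  | cons kv rest ih =>
    intro init
    simp only [List.foldl_cons, List.flatMap_cons, List.foldl_append]
    exact ih _

-- the two ports strip the leading '_' identically when invalid ≠ ""
theorem strip_eq (invalid : String) (h : invalid ≠ "") :
    (if PySem.Str.pyGet? invalid 0 = some '_' then PySem.Str.slice invalid (some 1) none else invalid) =
    (if PySem.Str.slice invalid none (some 1) = "_" then PySem.Str.slice invalid (some 1) none else invalid) := by
  have hl : invalid.toList ≠ [] := by
    intro hn
    apply h
    have := congrArg String.ofList hn
    simpa using this
  cases hcs : invalid.toList with
  | nil => exact absurd hcs hl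
  | cons c cs =>
    have h0 : PySem.Str.pyGet? invalid 0 = some c := by
      simp [PySem.Str.pyGet?, PySem.List.pyGet?, PySem.List.pyIdx?, hcs]
    have h1 : PySem.Str.slice invalid none (some 1) = String.ofList [c] := by
      simp [PySem.Str.slice, PySem.Chars.slice_eq_listSlice, hcs]
      rw [show ((1 : Int)) = ((1 : Nat) : Int) by norm_num, PySem.List.slice_to_natCast]
      simp
    rw [h0, h1]
    by_cases hc : c = '_'
    · subst hc
      rw [if_pos rfl, if_pos (by decide)]
    · rw [if_neg (by simp [hc]), if_neg ?_]
      intro he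
      apply hc
      have := congrArg String.toList he
      simpa using this

-- ===== VERDICT (by name: the statement is the Claim_ definition above) =====
theorem iter_ts_py_spec : Claim_equal_iter_ts_py := by
  intro full category invalid _hdom hpre
  obtain ⟨hinv, hcat, _hnd⟩ := hpre
  unfold Spec_iter_ts_py iter_ts_py iter_ts_py_alt
  simp only []
  rw [strip_eq invalid hinv]
  generalize (if PySem.Str.slice invalid none (some 1) = "_" then PySem.Str.slice invalid (some 1) none else invalid) = inv
  by_cases hc : category = ""
  · rw [if_neg (fun hne => hne hc), if_neg (fun hne => hne hc),
      nested_foldl_eq_flat, foldl_eq_lastMatch]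
  · rw [if_pos hc, if_pos hc]
    cases hget : (PySem.Dict.mk full).get? category with
    | some lines => simpa using foldl_eq_lastMatch inv lines
    | none =>
      exfalso
      rw [PySem.Dict.get?_eq_none_iff_not_mem_keys] at hget
      exact hget (by simpa [PySem.Dict.keys_mk] using hcat hc)
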